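-- pv_equiv track=rewrite | github.com/Mugdho-mugi/Conflict-Analysis-Tool | app.py | auto_score_intelligence
-- ===== SOURCE A (Python) =====
-- def auto_score_intelligence(text):
--     text = str(text).lower()
--     level_5_words = ['war', 'killed', 'strike', 'missile', 'offensive', 'airstrike', 'massacre', 'invasion']
--     level_4_words = ['clash', 'artillery', 'troops', 'rebel', 'skirmish', 'gunfire', 'militia']
--     level_3_words = ['protest', 'riot', 'tear gas', 'arrest', 'violence', 'clashes']
--     level_2_words = ['threat', 'sanction', 'tension', 'deploy', 'warns', 'diplomatic', 'standoff']
--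
--     if any(word in text for word in level_5_words): return 5, "War"
--     if any(word in text for word in level_4_words): return 4, "Limited War"
--     if any(word in text for word in level_3_words): return 3, "Violent Crisis"
--     if any(word in text for word in level_2_words): return 2, "Non-Violent Crisis"
--     return 1, "Dispute"
-- ===== SOURCE B (Python) =====
-- _KEYWORD_LEVELS = (
--     [(w, 5) for w in ['war', 'killed', 'strike', 'missile', 'offensive', 'airstrike', 'massacre', 'invasion']]
--     + [(w, 4) for w in ['clash', 'artillery', 'troops', 'rebel', 'skirmish', 'gunfire', 'militia']]
--     + [(w, 3) for w in ['protest', 'riot', 'tear gas', 'arrest', 'violence', 'clashes']]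
--     + [(w, 2) for w in ['threat', 'sanction', 'tension', 'deploy', 'warns', 'diplomatic', 'standoff']]
-- )
--
-- _LABELS = {5: 'War', 4: 'Limited War', 3: 'Violent Crisis', 2: 'Non-Violent Crisis'}
--
-- def auto_score_intelligence(text):
--     text = str(text).lower()
--     level = 1
--     for word, lvl in _KEYWORD_LEVELS:
--         if word in text:
--             level = max(level, lvl)
--     return level, _LABELS.get(level, 'Dispute')
-- ===== Notes on version B (the rewrite author's own statement) =====
-- stated objective: simpler
-- what changed: Replaces the four short-circuiting any() branches over separate keyword lists with a single (keyword, level) table scanned once while tracking the maximum matched level, then a label lookup.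
import Mathlib
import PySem

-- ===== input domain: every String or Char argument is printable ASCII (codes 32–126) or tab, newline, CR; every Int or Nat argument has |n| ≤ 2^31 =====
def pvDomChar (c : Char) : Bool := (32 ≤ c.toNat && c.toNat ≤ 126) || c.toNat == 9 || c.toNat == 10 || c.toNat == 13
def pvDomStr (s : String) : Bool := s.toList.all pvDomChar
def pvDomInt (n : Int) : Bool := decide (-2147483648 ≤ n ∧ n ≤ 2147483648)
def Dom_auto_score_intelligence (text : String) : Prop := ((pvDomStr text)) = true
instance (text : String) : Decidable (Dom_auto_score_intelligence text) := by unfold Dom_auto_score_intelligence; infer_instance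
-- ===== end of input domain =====

-- B replaces A's four short-circuiting `any` branches by one table of (keyword, level)
-- pairs scanned once, keeping the maximum matched level (simpler decomposition, same cost).

-- ===== PORT A =====
def pvL5 : List String := ["war", "killed", "strike", "missile", "offensive", "airstrike", "massacre", "invasion"]
def pvL4 : List String := ["clash", "artillery", "troops", "rebel", "skirmish", "gunfire", "militia"]
def pvL3 : List String := ["protest", "riot", "tear gas", "arrest", "violence", "clashes"]
def pvL2 : List String := ["threat", "sanction", "tension", "deploy", "warns", "diplomatic", "standoff"]

def auto_score_intelligence (text : String) : Int × String :=
  let t := PySem.Str.lower text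
  if pvL5.any (fun w => PySem.Str.isIn w t) then (5, "War")
  else if pvL4.any (fun w => PySem.Str.isIn w t) then (4, "Limited War")
  else if pvL3.any (fun w => PySem.Str.isIn w t) then (3, "Violent Crisis")
  else if pvL2.any (fun w => PySem.Str.isIn w t) then (2, "Non-Violent Crisis")
  else (1, "Dispute")

-- ===== PORT B =====
def pvKeywordLevels : List (String × Int) :=
  (["war", "killed", "strike", "missile", "offensive", "airstrike", "massacre", "invasion"].map (fun w => (w, (5 : Int))))
  ++ (["clash", "artillery", "troops", "rebel", "skirmish", "gunfire", "militia"].map (fun w => (w, (4 : Int))))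
  ++ (["protest", "riot", "tear gas", "arrest", "violence", "clashes"].map (fun w => (w, (3 : Int))))
  ++ (["threat", "sanction", "tension", "deploy", "warns", "diplomatic", "standoff"].map (fun w => (w, (2 : Int))))

def pvLabels : PySem.Dict Int String :=
  PySem.Dict.mk [(5, "War"), (4, "Limited War"), (3, "Violent Crisis"), (2, "Non-Violent Crisis")]

def auto_score_intelligence_alt (text : String) : Int × String :=
  let t := PySem.Str.lower text
  let level := pvKeywordLevels.foldl
    (fun lv e => if PySem.Str.isIn e.1 t then max lv e.2 else lv) 1
  (level, pvLabels.getD level "Dispute")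

-- ===== PRECONDITION & SPEC =====
def Spec_auto_score_intelligence (text : String) (out : Int × String) : Prop := out = auto_score_intelligence_alt text
instance (text : String) (out : Int × String) : Decidable (Spec_auto_score_intelligence text out) := by unfold Spec_auto_score_intelligence; infer_instance

-- ===== CLAIM (what is proved, stated in full; the proofs are below) =====
def Claim_equal_auto_score_intelligence : Prop := ∀ (text : String), Dom_auto_score_intelligence text → Spec_auto_score_intelligence text (auto_score_intelligence text)

-- ===== LEMMAS AND PROOFS =====

-- the fold never decreases its accumulator
theorem pvFold_ge (t : String) (L : List (String × Int)) (m : Int) :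
    m ≤ L.foldl (fun lv e => if PySem.Str.isIn e.1 t then max lv e.2 else lv) m := by
  induction L generalizing m with
  | nil => simp
  | cons e L ih =>
    simp only [List.foldl_cons]
    split
    · exact le_trans (le_max_left _ _) (ih _)
    · exact ih _

-- the fold stays below any bound dominating the start and every matched level
theorem pvFold_le (t : String) (L : List (String × Int)) (m k : Int)
    (hm : m ≤ k) (h : ∀ e ∈ L, PySem.Str.isIn e.1 t = true → e.2 ≤ k) :
    L.foldl (fun lv e => if PySem.Str.isIn e.1 t then max lv e.2 else lv) m ≤ k := by
  induction L generalizing m with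
  | nil => simpa
  | cons e L ih =>
    simp only [List.foldl_cons]
    split
    · next hin =>
      exact ih _ (max_le hm (h e (by simp) hin)) (fun e' he' => h e' (List.mem_cons_of_mem _ he'))
    · exact ih _ hm (fun e' he' => h e' (List.mem_cons_of_mem _ he'))

-- a matched entry's level bounds the fold from below
theorem pvFold_ge_mem (t : String) (L : List (String × Int)) (m : Int)
    (e : String × Int) (he : e ∈ L) (hin : PySem.Str.isIn e.1 t = true) :
    e.2 ≤ L.foldl (fun lv e => if PySem.Str.isIn e.1 t then max lv e.2 else lv) m := by
  induction L generalizing m with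
  | nil => cases he
  | cons a L ih =>
    simp only [List.foldl_cons]
    rcases List.mem_cons.mp he with rfl | he'
    · rw [if_pos hin]
      exact le_trans (le_max_right _ _) (pvFold_ge t L _)
    · exact ih _ he'

-- every table entry comes from one of the four keyword groups
theorem pvDecomp : ∀ e ∈ pvKeywordLevels,
    (e.2 = 5 ∧ e.1 ∈ pvL5) ∨ (e.2 = 4 ∧ e.1 ∈ pvL4) ∨ (e.2 = 3 ∧ e.1 ∈ pvL3) ∨ (e.2 = 2 ∧ e.1 ∈ pvL2) := by
  intro e he
  unfold pvKeywordLevels at he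
  simp only [List.mem_append, List.mem_map] at he
  rcases he with ((⟨w, hw, rfl⟩ | ⟨w, hw, rfl⟩) | ⟨w, hw, rfl⟩) | ⟨w, hw, rfl⟩
  · exact Or.inl ⟨rfl, hw⟩
  · exact Or.inr (Or.inl ⟨rfl, hw⟩)
  · exact Or.inr (Or.inr (Or.inl ⟨rfl, hw⟩))
  · exact Or.inr (Or.inr (Or.inr ⟨rfl, hw⟩))

theorem auto_score_intelligence_spec' : ∀ (text : String),
    auto_score_intelligence text = auto_score_intelligence_alt text := by
  intro text
  unfold auto_score_intelligence
  set t := PySem.Str.lower text with ht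
  set F := fun (lv : Int) (e : String × Int) => if PySem.Str.isIn e.1 t then max lv e.2 else lv with hF
  have halt : auto_score_intelligence_alt text =
      (pvKeywordLevels.foldl F 1, pvLabels.getD (pvKeywordLevels.foldl F 1) "Dispute") := rfl
  rw [halt]
  have hmem5 : ∀ w ∈ pvL5, (w, (5 : Int)) ∈ pvKeywordLevels := by
    intro w hw; unfold pvKeywordLevels
    simp only [List.mem_append, List.mem_map]
    exact Or.inl (Or.inl (Or.inl ⟨w, hw, rfl⟩))
  have hmem4 : ∀ w ∈ pvL4, (w, (4 : Int)) ∈ pvKeywordLevels := by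
    intro w hw; unfold pvKeywordLevels
    simp only [List.mem_append, List.mem_map]
    exact Or.inl (Or.inl (Or.inr ⟨w, hw, rfl⟩))
  have hmem3 : ∀ w ∈ pvL3, (w, (3 : Int)) ∈ pvKeywordLevels := by
    intro w hw; unfold pvKeywordLevels
    simp only [List.mem_append, List.mem_map]
    exact Or.inl (Or.inr ⟨w, hw, rfl⟩)
  have hmem2 : ∀ w ∈ pvL2, (w, (2 : Int)) ∈ pvKeywordLevels := by
    intro w hw; unfold pvKeywordLevels
    simp only [List.mem_append, List.mem_map]
    exact Or.inr ⟨w, hw, rfl⟩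
  by_cases h5 : pvL5.any (fun w => PySem.Str.isIn w t) = true
  · obtain ⟨w, hw, hin⟩ := List.any_eq_true.mp h5
    have hfold : pvKeywordLevels.foldl F 1 = 5 := by
      refine le_antisymm (pvFold_le t _ 1 5 (by norm_num) ?_) (pvFold_ge_mem t _ 1 (w, 5) (hmem5 w hw) hin)
      intro e he _
      rcases pvDecomp e he with ⟨h, _⟩ | ⟨h, _⟩ | ⟨h, _⟩ | ⟨h, _⟩ <;> omega
    rw [if_pos h5, hfold]
    decide
  · rw [Bool.not_eq_true] at h5
    have n5 := List.any_eq_false.mp h5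
    by_cases h4 : pvL4.any (fun w => PySem.Str.isIn w t) = true
    · obtain ⟨w, hw, hin⟩ := List.any_eq_true.mp h4
      have hfold : pvKeywordLevels.foldl F 1 = 4 := by
        refine le_antisymm (pvFold_le t _ 1 4 (by norm_num) ?_) (pvFold_ge_mem t _ 1 (w, 4) (hmem4 w hw) hin)
        intro e he hine
        rcases pvDecomp e he with ⟨h, hg⟩ | ⟨h, _⟩ | ⟨h, _⟩ | ⟨h, _⟩
        · exact absurd hine (n5 e.1 hg)
        all_goals omega
      rw [if_neg (by simpa using h5), if_pos h4, hfold]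
      decide
    · rw [Bool.not_eq_true] at h4
      have n4 := List.any_eq_false.mp h4
      by_cases h3 : pvL3.any (fun w => PySem.Str.isIn w t) = true
      · obtain ⟨w, hw, hin⟩ := List.any_eq_true.mp h3
        have hfold : pvKeywordLevels.foldl F 1 = 3 := by
          refine le_antisymm (pvFold_le t _ 1 3 (by norm_num) ?_) (pvFold_ge_mem t _ 1 (w, 3) (hmem3 w hw) hin)
          intro e he hine
          rcases pvDecomp e he with ⟨h, hg⟩ | ⟨h, hg⟩ | ⟨h, _⟩ | ⟨h, _⟩
          · exact absurd hine (n5 e.1 hg)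
          · exact absurd hine (n4 e.1 hg)
          all_goals omega
        rw [if_neg (by simpa using h5), if_neg (by simpa using h4), if_pos h3, hfold]
        decide
      · rw [Bool.not_eq_true] at h3
        have n3 := List.any_eq_false.mp h3
        by_cases h2 : pvL2.any (fun w => PySem.Str.isIn w t) = true
        · obtain ⟨w, hw, hin⟩ := List.any_eq_true.mp h2
          have hfold : pvKeywordLevels.foldl F 1 = 2 := by
            refine le_antisymm (pvFold_le t _ 1 2 (by norm_num) ?_) (pvFold_ge_mem t _ 1 (w, 2) (hmem2 w hw) hin)
            intro e he hine
            rcases pvDecomp e he with ⟨h, hg⟩ | ⟨h, hg⟩ | ⟨h, hg⟩ | ⟨h, _⟩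
            · exact absurd hine (n5 e.1 hg)
            · exact absurd hine (n4 e.1 hg)
            · exact absurd hine (n3 e.1 hg)
            · omega
          rw [if_neg (by simpa using h5), if_neg (by simpa using h4), if_neg (by simpa using h3), if_pos h2, hfold]
          decide
        · rw [Bool.not_eq_true] at h2
          have n2 := List.any_eq_false.mp h2
          have hfold : pvKeywordLevels.foldl F 1 = 1 := by
            refine le_antisymm (pvFold_le t _ 1 1 le_rfl ?_) (pvFold_ge t _ 1)
            intro e he hine
            rcases pvDecomp e he with ⟨h, hg⟩ | ⟨h, hg⟩ | ⟨h, hg⟩ | ⟨h, hg⟩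
            · exact absurd hine (n5 e.1 hg)
            · exact absurd hine (n4 e.1 hg)
            · exact absurd hine (n3 e.1 hg)
            · exact absurd hine (n2 e.1 hg)
          rw [if_neg (by simpa using h5), if_neg (by simpa using h4), if_neg (by simpa using h3), if_neg (by simpa using h2), hfold]
          decide

-- ===== VERDICT (by name: the statement is the Claim_ definition above) =====
theorem auto_score_intelligence_spec : Claim_equal_auto_score_intelligence := by
  intro text _
  exact auto_score_intelligence_spec' text
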